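-- pv_equiv track=rewrite | github.com/mmh132/ProjectEuler | work/P214.py | radsieve
-- ===== SOURCE A (Python) =====
-- def radsieve(n):
--     e = []
--     facs = []
--     for i in range(n+1): facs.append(e.copy())
--     for i in range(2, n+1):
--         if facs[i] == []:
--             for k in range(i, n+1, i):
--                 facs[k].append(i)
--     return facs
-- ===== SOURCE B (Python) =====
-- def radsieve(n):
--     size = n + 1 if n >= 0 else 0
--     spf = [0] * size
--     for d in range(2, size):
--         if spf[d] == 0:
--             for k in range(d, size, d):
--                 if spf[k] == 0:
--                     spf[k] = d
--     facs = []
--     for m in range(size):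
--         row = []
--         while m > 1:
--             p = spf[m]
--             row.append(p)
--             while m % p == 0:
--                 m //= p
--         facs.append(row)
--     return facs
-- ===== Notes on version B (the rewrite author's own statement) =====
-- stated objective: alternative
-- what changed: Instead of A's factor sieve that appends each prime to the list of every multiple (a table of growing lists with an empty-list primality test), B sieves a flat smallest-prime-factor array (set-if-unset per multiple) and then reconstructs each number's distinct prime factors independently by repeatedly reading spf[m] and dividing it out.
import Mathlib
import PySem

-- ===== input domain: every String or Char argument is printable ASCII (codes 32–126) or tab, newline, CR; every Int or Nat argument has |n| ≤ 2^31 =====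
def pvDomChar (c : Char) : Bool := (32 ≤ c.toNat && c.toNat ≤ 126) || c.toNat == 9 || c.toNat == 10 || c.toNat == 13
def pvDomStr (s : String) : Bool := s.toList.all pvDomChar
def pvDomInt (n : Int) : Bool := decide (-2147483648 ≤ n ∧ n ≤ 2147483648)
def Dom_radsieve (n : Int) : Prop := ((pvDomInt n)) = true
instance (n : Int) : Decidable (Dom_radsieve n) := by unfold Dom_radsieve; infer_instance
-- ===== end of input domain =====

-- B replaces A's list-of-lists factor sieve by a smallest-prime-factor table plus per-number division chains (alternative, similar cost).

-- ===== PORT A =====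
-- facs[k].append(i); exact for 0 ≤ k < facs.length, which holds at every call site
def pyAppendAt (facs : List (List Int)) (k : Int) (v : Int) : List (List Int) :=
  facs.set k.toNat ((facs.getD k.toNat []) ++ [v])

-- for k in range(i, nlim, i): facs[k].append(i)
def pvSieveInner (i nlim : Int) (facs : List (List Int)) : List (List Int) :=
  (PySem.List.pyRange i nlim i).foldl (fun f k => pyAppendAt f k i) facs

-- one iteration of the outer loop; the facs[i] read is exact since 2 ≤ i < facs.length
def pvSieveOuter (nlim : Int) (facs : List (List Int)) (i : Int) : List (List Int) :=
  if facs.getD i.toNat [] = [] then pvSieveInner i nlim facs else facs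

def radsieve (n : Int) : List (List Int) :=
  (PySem.List.pyRange 2 (n+1) 1).foldl (pvSieveOuter (n+1))
    ((PySem.List.pyRange 0 (n+1) 1).map (fun _ => ([] : List Int)))

-- ===== PORT B =====
-- while rem % d == 0: rem //= d   (fuel only bounds the iteration count; rem.toNat is always enough)
def pvStripF : Nat → Int → Int → Int
  | 0, rem, _ => rem
  | fuel+1, rem, d =>
    if PySem.Int.mod rem d = 0 then pvStripF fuel (PySem.Int.floordiv rem d) d else rem

def pvStrip (rem d : Int) : Int := pvStripF rem.toNat rem d

-- for k in range(d, size, d): if spf[k] == 0: spf[k] = d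
def pvSpfInner (d size : Int) (spf : List Int) : List Int :=
  (PySem.List.pyRange d size d).foldl
    (fun s k => if s.getD k.toNat 0 = 0 then s.set k.toNat d else s) spf

-- one iteration of the first loop; the spf[d] read is exact since 2 ≤ d < spf.length
def pvSpfOuter (size : Int) (spf : List Int) (d : Int) : List Int :=
  if spf.getD d.toNat 0 = 0 then pvSpfInner d size spf else spf

def pvSpfTable (size : Int) : List Int :=
  (PySem.List.pyRange 2 size 1).foldl (pvSpfOuter size)
    ((PySem.List.pyRange 0 size 1).map (fun _ => (0 : Int)))

-- while m > 1: p = spf[m]; row.append(p); while m % p == 0: m //= p   (fuel bounds iterations)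
def pvChainF : Nat → Int → List Int → List Int → List Int
  | 0, _, _, row => row
  | fuel+1, m, spf, row =>
    if 1 < m then
      pvChainF fuel (pvStrip m (spf.getD m.toNat 0)) spf (row ++ [spf.getD m.toNat 0])
    else row

def pvRow (spf : List Int) (m : Int) : List Int := pvChainF m.toNat m spf []

def radsieve_alt (n : Int) : List (List Int) :=
  let size := if 0 ≤ n then n + 1 else 0
  (PySem.List.pyRange 0 size 1).map (pvRow (pvSpfTable size))

-- ===== PRECONDITION & SPEC =====
def Spec_radsieve (n : Int) (out : List (List Int)) : Prop := out = radsieve_alt n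
instance (n : Int) (out : List (List Int)) : Decidable (Spec_radsieve n out) := by unfold Spec_radsieve; infer_instance

-- ===== CLAIM (what is proved, stated in full; the proofs are below) =====
def Claim_equal_radsieve : Prop := ∀ (n : Int), Dom_radsieve n → Spec_radsieve n (radsieve n)

-- ===== LEMMAS AND PROOFS =====

def pvGold (j k : Int) : List Int :=
  (PySem.List.pyRange 2 j 1).filter (fun p => decide (p ∣ k ∧ p ≤ k ∧ p.natAbs.Prime))

def pvState (n j : Int) : List (List Int) :=
  (PySem.List.pyRange 0 (n+1) 1).map (fun k => pvGold j k)

theorem pv_prime_iff (d : Int) (h2 : 2 ≤ d) :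
    d.natAbs.Prime ↔ ∀ e : Int, 2 ≤ e → e < d → ¬ e ∣ d := by
  constructor
  · intro hp e he2 hed hdvd
    have h1 : e.natAbs ∣ d.natAbs := Int.natAbs_dvd_natAbs.mpr hdvd
    rcases (Nat.Prime.eq_one_or_self_of_dvd hp _ h1) with h | h
    · omega
    · omega
  · intro h
    rw [Nat.prime_def_lt]
    refine ⟨by omega, ?_⟩
    intro a ha hdvd
    by_contra hne
    have ha0 : a ≠ 0 := by
      rintro rfl
      simp at hdvd
      omega
    have h2a : 2 ≤ a := by omega
    exact h (a : Int) (by omega) (by omega)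
      (Int.natAbs_dvd_natAbs.mp (by simpa using hdvd))

theorem pv_prime_iff' (j : Int) (h2 : 2 ≤ j) :
    j.natAbs.Prime ↔ ∀ p : Int, 2 ≤ p → p < j → p.natAbs.Prime → ¬ p ∣ j := by
  constructor
  · intro hp p hp2 hpj _ hdvd
    exact (pv_prime_iff j h2).mp hp p hp2 hpj hdvd
  · intro h
    by_contra hnp
    obtain ⟨q, hq, hqd⟩ := Nat.exists_prime_and_dvd (n := j.natAbs) (by omega)
    have hq2 : 2 ≤ q := hq.two_le
    have hqlt : (q : Int) < j := by
      have hle : q ≤ j.natAbs := Nat.le_of_dvd (by omega) hqd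
      rcases Nat.lt_or_ge q j.natAbs with h' | h'
      · omega
      · exfalso
        have : q = j.natAbs := by omega
        subst this
        exact hnp hq
    exact h (q : Int) (by omega) hqlt (by simpa using hq)
      (Int.natAbs_dvd_natAbs.mp (by simpa using hqd))

theorem pv_getD_map {β : Type} (g : Int → β) (dflt : β) (m k : Int) (h0 : 0 ≤ k) (hm : k < m) :
    ((PySem.List.pyRange 0 m 1).map g).getD k.toNat dflt = g k := by
  have hlen : k.toNat < ((PySem.List.pyRange 0 m 1).map g).length := by
    simp [PySem.List.length_pyRange_one]; omega
  rw [List.getD_eq_getElem _ _ hlen]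
  rw [List.getElem_map]
  rw [PySem.List.getElem_pyRange_one]
  congr 1
  omega

theorem pv_set_map {β : Type} (g : Int → β) (m k : Int) (y : β) (h0 : 0 ≤ k) :
    ((PySem.List.pyRange 0 m 1).map g).set k.toNat y
      = (PySem.List.pyRange 0 m 1).map (fun x => if x = k then y else g x) := by
  apply List.ext_getElem
  · simp
  · intro i h1 h2
    have hi : i < (m).toNat := by simpa [PySem.List.length_pyRange_one] using h2
    rw [List.getElem_set]
    rw [List.getElem_map, List.getElem_map, PySem.List.getElem_pyRange_one]
    by_cases h : k.toNat = i
    · rw [if_pos h, if_pos (by omega)]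
    · rw [if_neg h, if_neg (by omega)]

theorem pv_foldl_setIf (g : Int → Int) (m v : Int) (ks : List Int)
    (hnd : ks.Nodup) (hmem : ∀ k ∈ ks, 0 ≤ k ∧ k < m) :
    ks.foldl (fun s k => if s.getD k.toNat 0 = 0 then s.set k.toNat v else s)
        ((PySem.List.pyRange 0 m 1).map g)
      = (PySem.List.pyRange 0 m 1).map (fun x => if x ∈ ks ∧ g x = 0 then v else g x) := by
  induction ks generalizing g with
  | nil => simp
  | cons k rest ih =>
    obtain ⟨hk0, hkm⟩ := hmem k (by simp)
    have hknr : k ∉ rest := (List.nodup_cons.mp hnd).1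
    rw [List.foldl_cons, pv_getD_map g 0 m k hk0 hkm]
    have hstep : (if g k = 0 then ((PySem.List.pyRange 0 m 1).map g).set k.toNat v
          else (PySem.List.pyRange 0 m 1).map g)
        = (PySem.List.pyRange 0 m 1).map (fun x => if x = k then (if g k = 0 then v else g k) else g x) := by
      by_cases hz : g k = 0
      · rw [if_pos hz, pv_set_map g m k v hk0]
        apply List.map_congr_left
        intro x _
        by_cases hxk : x = k
        · rw [if_pos hxk, if_pos hxk, if_pos hz]
        · rw [if_neg hxk, if_neg hxk]
      · rw [if_neg hz]
        apply List.map_congr_left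
        intro x _
        by_cases hxk : x = k
        · rw [if_pos hxk, if_neg hz, hxk]
        · rw [if_neg hxk]
    rw [hstep, ih _ (List.nodup_cons.mp hnd).2 (fun x hx => hmem x (by simp [hx]))]
    apply List.map_congr_left
    intro x _
    by_cases hxk : x = k
    · subst hxk
      have hnr : ¬ (x ∈ rest ∧ (if x = x then (if g x = 0 then v else g x) else g x) = 0) := by
        rintro ⟨hr, -⟩; exact hknr hr
      rw [if_neg hnr, if_pos rfl]
      by_cases hz : g x = 0
      · rw [if_pos hz, if_pos ⟨by simp, hz⟩]
      · rw [if_neg hz, if_neg (by rintro ⟨-, h⟩; exact hz h)]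
    · rw [if_neg hxk]
      by_cases hc : x ∈ rest ∧ g x = 0
      · rw [if_pos hc, if_pos ⟨by simp [hc.1], hc.2⟩]
      · rw [if_neg hc, if_neg (by rintro ⟨hm', hz⟩; exact hc ⟨by simpa [hxk] using hm', hz⟩)]

theorem pv_foldl_appendAt (g : Int → List Int) (m v : Int) (ks : List Int)
    (hnd : ks.Nodup) (hmem : ∀ k ∈ ks, 0 ≤ k ∧ k < m) :
    ks.foldl (fun f k => pyAppendAt f k v) ((PySem.List.pyRange 0 m 1).map g)
      = (PySem.List.pyRange 0 m 1).map (fun k => g k ++ if k ∈ ks then [v] else []) := by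
  induction ks generalizing g with
  | nil => simp
  | cons k rest ih =>
    obtain ⟨hk0, hkm⟩ := hmem k (by simp)
    have hknr : k ∉ rest := (List.nodup_cons.mp hnd).1
    rw [List.foldl_cons]
    have hstep : pyAppendAt ((PySem.List.pyRange 0 m 1).map g) k v
        = (PySem.List.pyRange 0 m 1).map (fun x => if x = k then g k ++ [v] else g x) := by
      rw [pyAppendAt, pv_getD_map g [] m k hk0 hkm, pv_set_map _ _ _ _ hk0]
    rw [hstep, ih _ (List.nodup_cons.mp hnd).2 (fun x hx => hmem x (by simp [hx]))]
    apply List.map_congr_left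
    intro x _
    by_cases hxk : x = k
    · subst hxk
      rw [if_pos rfl, if_neg hknr, if_pos (by simp)]
      simp
    · rw [if_neg hxk]
      congr 1
      by_cases hxr : x ∈ rest
      · rw [if_pos hxr, if_pos (by simp [hxr])]
      · rw [if_neg hxr, if_neg (by simp [hxk, hxr])]

theorem pv_gold_succ (j k : Int) (h2 : 2 ≤ j) :
    pvGold (j+1) k = pvGold j k ++ if j ∣ k ∧ j ≤ k ∧ j.natAbs.Prime then [j] else [] := by
  rw [pvGold, PySem.List.pyRange_one_succ_right (by omega), List.filter_append, pvGold]
  congr 1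
  simp only [List.filter_cons, List.filter_nil, decide_eq_true_eq]

theorem pv_step (n j : Int) (h2 : 2 ≤ j) (hj : j ≤ n) :
    pvSieveOuter (n+1) (pvState n j) j = pvState n (j+1) := by
  have hread : (pvState n j).getD j.toNat [] = pvGold j j := by
    rw [pvState]; exact pv_getD_map _ [] _ _ (by omega) (by omega)
  have hempty : pvGold j j = [] ↔ j.natAbs.Prime := by
    rw [pvGold, List.filter_eq_nil_iff, pv_prime_iff' j h2]
    constructor
    · intro h p hp2 hpj hpp hpd
      exact absurd (by simp only [decide_eq_true_eq]; exact ⟨hpd, by omega, hpp⟩)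
        (h p (PySem.List.mem_pyRange_one.mpr ⟨hp2, hpj⟩))
    · intro h p hp
      rw [PySem.List.mem_pyRange_one] at hp
      simp only [decide_eq_true_eq]
      rintro ⟨hpd, -, hpp⟩
      exact h p hp.1 hp.2 hpp hpd
  rw [pvSieveOuter, hread]
  by_cases hp : j.natAbs.Prime
  · rw [if_pos (hempty.mpr hp)]
    rw [pvSieveInner, pvState]
    have hnd : (PySem.List.pyRange j (n+1) j).Nodup := by
      rw [PySem.List.pyRange_of_pos j (n+1) (by omega)]
      refine List.Nodup.map ?_ List.nodup_range
      intro a b hab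
      simp only at hab
      have : j * (a : Int) = j * b := by omega
      have := mul_left_cancel₀ (by omega : (j:Int) ≠ 0) this
      exact_mod_cast this
    have hmem : ∀ k ∈ PySem.List.pyRange j (n+1) j, 0 ≤ k ∧ k < n + 1 := by
      intro k hk
      rw [PySem.List.mem_pyRange_iff_of_pos (by omega)] at hk
      omega
    rw [pv_foldl_appendAt _ _ _ _ hnd hmem, pvState]
    apply List.map_congr_left
    intro k hk
    rw [PySem.List.mem_pyRange_one] at hk
    rw [pv_gold_succ j k h2]
    congr 1
    by_cases hc : j ∣ k ∧ j ≤ k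
    · rw [if_pos, if_pos ⟨hc.1, hc.2, hp⟩]
      rw [PySem.List.mem_pyRange_iff_of_pos (by omega)]
      refine ⟨hc.2, by omega, ?_⟩
      obtain ⟨c, hcc⟩ := hc.1
      exact ⟨c - 1, by rw [hcc]; ring⟩ -- k - j = j*(c-1)
    · rw [if_neg, if_neg (by tauto)]
      rw [PySem.List.mem_pyRange_iff_of_pos (by omega)]
      rintro ⟨hle, -, c, hcc⟩
      exact hc ⟨⟨c + 1, by rw [mul_add, mul_one]; omega⟩, hle⟩
  · rw [if_neg (fun hh => hp (hempty.mp hh))]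
    rw [pvState, pvState]
    apply List.map_congr_left
    intro k _
    rw [pv_gold_succ j k h2, if_neg (by tauto), List.append_nil]

theorem pv_sieve_inv (n : Int) (t : Nat) (h : 2 + (t : Int) ≤ n + 1) :
    (PySem.List.pyRange 2 (2 + (t : Int)) 1).foldl (pvSieveOuter (n+1))
        ((PySem.List.pyRange 0 (n+1) 1).map (fun _ => ([] : List Int)))
      = pvState n (2 + (t : Int)) := by
  induction t with
  | zero =>
    simp only [Nat.cast_zero, add_zero]
    rw [PySem.List.pyRange_one_eq_nil le_rfl, List.foldl_nil, pvState]
    apply List.map_congr_left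
    intro k _
    rw [pvGold, PySem.List.pyRange_one_eq_nil le_rfl, List.filter_nil]
  | succ t ih =>
    have hc : (2 : Int) + ((t + 1 : Nat) : Int) = (2 + (t : Int)) + 1 := by push_cast; ring
    rw [hc, PySem.List.pyRange_one_succ_right (a := 2) (b := 2 + (t:Int)) (by omega), List.foldl_append, List.foldl_cons,
      List.foldl_nil, ih (by omega), pv_step n (2 + (t : Int)) (by omega) (by omega)]

theorem pvStripF_div_facts (rem d : Int) (hr : 1 ≤ rem) (hd : 2 ≤ d)
    (hm : PySem.Int.mod rem d = 0) :
    1 ≤ PySem.Int.floordiv rem d ∧ PySem.Int.floordiv rem d < rem ∧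
      PySem.Int.floordiv rem d * d = rem := by
  rw [PySem.Int.floordiv_eq_ediv_of_pos (by omega)]
  have hdvd : d ∣ rem := (PySem.Int.mod_eq_zero_iff_dvd rem d).mp hm
  have hqd : rem / d * d = rem := Int.ediv_mul_cancel hdvd
  have key : d * (rem / d) + rem % d = rem := Int.mul_ediv_add_emod rem d
  have hq : 0 ≤ rem / d := Int.ediv_nonneg (by omega) (by omega)
  refine ⟨by nlinarith, by nlinarith, hqd⟩

theorem pvStripF_pos (fuel : Nat) (rem d : Int) (hr : 1 ≤ rem) (hd : 2 ≤ d) :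
    1 ≤ pvStripF fuel rem d := by
  induction fuel generalizing rem with
  | zero => exact hr
  | succ fuel ih =>
    rw [pvStripF]
    by_cases hm : PySem.Int.mod rem d = 0
    · rw [if_pos hm]
      exact ih _ (pvStripF_div_facts rem d hr hd hm).1
    · rw [if_neg hm]; exact hr

theorem pvStripF_spec (fuel : Nat) (rem d : Int) (hr : 1 ≤ rem) (hd : 2 ≤ d)
    (hfuel : rem.toNat ≤ fuel) :
    ∃ k : Nat, rem = pvStripF fuel rem d * d ^ k ∧ ¬ d ∣ pvStripF fuel rem d := by
  induction fuel generalizing rem with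
  | zero => omega
  | succ fuel ih =>
    rw [pvStripF]
    by_cases hm : PySem.Int.mod rem d = 0
    · rw [if_pos hm]
      obtain ⟨h1, h2, h3⟩ := pvStripF_div_facts rem d hr hd hm
      obtain ⟨k, hk, hnd⟩ := ih (PySem.Int.floordiv rem d) h1 (by omega)
      refine ⟨k + 1, ?_, hnd⟩
      calc rem = PySem.Int.floordiv rem d * d := h3.symm
        _ = pvStripF fuel (PySem.Int.floordiv rem d) d * d ^ k * d := by rw [← hk]
        _ = pvStripF fuel (PySem.Int.floordiv rem d) d * d ^ (k + 1) := by ring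
    · rw [if_neg hm]
      refine ⟨0, by ring, ?_⟩
      rw [← PySem.Int.mod_eq_zero_iff_dvd]
      exact hm

theorem pvStrip_pos (rem d : Int) (hr : 1 ≤ rem) (hd : 2 ≤ d) : 1 ≤ pvStrip rem d :=
  pvStripF_pos _ rem d hr hd

theorem pvStrip_spec (rem d : Int) (hr : 1 ≤ rem) (hd : 2 ≤ d) :
    ∃ k : Nat, rem = pvStrip rem d * d ^ k ∧ ¬ d ∣ pvStrip rem d :=
  pvStripF_spec _ rem d hr hd le_rfl

def pvMF (k : Int) : Int := (k.toNat.minFac : Int)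

def pvF (j k : Int) : Int := if 2 ≤ k ∧ pvMF k < j then pvMF k else 0

theorem pv_mf_facts (k : Int) (h2 : 2 ≤ k) :
    pvMF k ∣ k ∧ 2 ≤ pvMF k ∧ pvMF k ≤ k ∧ (pvMF k).natAbs.Prime ∧
      (∀ q : Int, 2 ≤ q → q.natAbs.Prime → q ∣ k → pvMF k ≤ q) := by
  have hk : k.toNat ≥ 2 := by omega
  have hkk : ((k.toNat : Nat) : Int) = k := by omega
  have hp : k.toNat.minFac.Prime := Nat.minFac_prime (by omega)
  refine ⟨?_, by rw [pvMF]; exact_mod_cast hp.two_le, ?_, by rw [pvMF]; simpa using hp, ?_⟩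
  · have := Nat.minFac_dvd k.toNat
    rw [pvMF, ← hkk]
    exact_mod_cast this
  · have := Nat.minFac_le (by omega : 0 < k.toNat)
    rw [pvMF, ← hkk]
    exact_mod_cast this
  · intro q hq2 hqp hqd
    have hqn : q.toNat.Prime := by
      have : q.natAbs = q.toNat := by omega
      rwa [this] at hqp
    have hdq : q.toNat ∣ k.toNat := by
      have := Int.natAbs_dvd_natAbs.mpr hqd
      have e1 : q.natAbs = q.toNat := by omega
      have e2 : k.natAbs = k.toNat := by omega
      rwa [e1, e2] at this
    have := Nat.minFac_le_of_dvd (hqn.two_le) hdq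
    rw [pvMF]
    omega

theorem pv_f_zero_iff (d : Int) (h2 : 2 ≤ d) : pvF d d = 0 ↔ d.natAbs.Prime := by
  obtain ⟨hdvd, hmf2, hmfle, hmfp, hmin⟩ := pv_mf_facts d h2
  have habs : d.natAbs = d.toNat := by omega
  rw [pvF]
  constructor
  · intro h
    have hnlt : ¬ pvMF d < d := by
      intro hlt
      rw [if_pos ⟨h2, hlt⟩] at h
      omega
    have : pvMF d = d := by omega
    rw [habs, Nat.prime_def_minFac]
    constructor
    · omega
    · rw [pvMF] at this; omega
  · intro hp
    rw [habs, Nat.prime_def_minFac] at hp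
    rw [if_neg]
    rintro ⟨-, hlt⟩
    rw [pvMF] at hlt
    omega

theorem pv_spf_step (n d : Int) (h2 : 2 ≤ d) (hd : d ≤ n) (hp : d.natAbs.Prime) :
    (PySem.List.pyRange 0 (n+1) 1).map
        (fun x => if x ∈ PySem.List.pyRange d (n+1) d ∧ pvF d x = 0 then d else pvF d x)
      = (PySem.List.pyRange 0 (n+1) 1).map (pvF (d+1)) := by
  apply List.map_congr_left
  intro k hk
  rw [PySem.List.mem_pyRange_one] at hk
  by_cases hk2 : 2 ≤ k
  · obtain ⟨hdvd, hmf2, hmfle, hmfp, hmin⟩ := pv_mf_facts k hk2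
    by_cases hmem : k ∈ PySem.List.pyRange d (n+1) d
    · rw [PySem.List.mem_pyRange_iff_of_pos (by omega)] at hmem
      obtain ⟨hdk, -, c, hc⟩ := hmem
      have hddk : d ∣ k := ⟨c + 1, by rw [mul_add, mul_one]; omega⟩
      have hmfled : pvMF k ≤ d := hmin d h2 hp hddk
      by_cases hz : pvF d k = 0
      · have hnlt : ¬ pvMF k < d := by
          intro hlt
          rw [pvF, if_pos ⟨hk2, hlt⟩] at hz
          omega
        have heq : pvMF k = d := by omega
        have hmem2 : k ∈ PySem.List.pyRange d (n+1) d := by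
          rw [PySem.List.mem_pyRange_iff_of_pos (by omega)]
          exact ⟨hdk, by omega, c, hc⟩
        rw [if_pos ⟨hmem2, hz⟩]
        rw [pvF, if_pos ⟨hk2, by omega⟩, heq]
      · rw [if_neg (by rintro ⟨-, h⟩; exact hz h)]
        have hlt : pvMF k < d := by
          by_contra hnlt
          exact hz (by rw [pvF, if_neg (by rintro ⟨-, h⟩; omega)])
        rw [pvF, if_pos ⟨hk2, hlt⟩, pvF, if_pos ⟨hk2, by omega⟩]
    · rw [if_neg (by rintro ⟨h, -⟩; exact hmem h)]
      have hne : pvMF k ≠ d := by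
        intro heq
        apply hmem
        rw [PySem.List.mem_pyRange_iff_of_pos (by omega)]
        have hddk : d ∣ k := heq ▸ hdvd
        obtain ⟨c, hc⟩ := hddk
        refine ⟨by omega, by omega, c - 1, by rw [hc]; ring⟩
      rw [pvF, pvF]
      by_cases hlt : pvMF k < d
      · rw [if_pos ⟨hk2, hlt⟩, if_pos ⟨hk2, by omega⟩]
      · rw [if_neg (by rintro ⟨-, h⟩; exact hlt h), if_neg (by rintro ⟨-, h⟩; omega)]
  · have h0 : pvF d k = 0 := by rw [pvF, if_neg (by rintro ⟨h, -⟩; omega)]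
    have h1 : pvF (d+1) k = 0 := by rw [pvF, if_neg (by rintro ⟨h, -⟩; omega)]
    rw [if_neg (by
      rintro ⟨hm', -⟩
      rw [PySem.List.mem_pyRange_iff_of_pos (by omega)] at hm'
      omega), h0, h1]

theorem pv_spf_step_np (n d : Int) (h2 : 2 ≤ d) (hp : ¬ d.natAbs.Prime) (k : Int) :
    pvF (d+1) k = pvF d k := by
  rw [pvF, pvF]
  by_cases hk2 : 2 ≤ k
  · obtain ⟨hdvd, hmf2, hmfle, hmfp, hmin⟩ := pv_mf_facts k hk2
    have hne : pvMF k ≠ d := by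
      intro heq
      exact hp (heq ▸ hmfp)
    by_cases hlt : pvMF k < d
    · rw [if_pos ⟨hk2, by omega⟩, if_pos ⟨hk2, hlt⟩]
    · rw [if_neg (by rintro ⟨-, h⟩; omega), if_neg (by rintro ⟨-, h⟩; exact hlt h)]
  · rw [if_neg (by rintro ⟨h, -⟩; omega), if_neg (by rintro ⟨h, -⟩; omega)]

theorem pv_spf_istep (n j : Int) (h2 : 2 ≤ j) (hj : j ≤ n) :
    pvSpfOuter (n+1) ((PySem.List.pyRange 0 (n+1) 1).map (pvF j)) j
      = (PySem.List.pyRange 0 (n+1) 1).map (pvF (j+1)) := by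
  rw [pvSpfOuter, pv_getD_map (pvF j) 0 (n+1) j (by omega) (by omega)]
  by_cases hp : j.natAbs.Prime
  · rw [if_pos ((pv_f_zero_iff j h2).mpr hp), pvSpfInner]
    have hnd : (PySem.List.pyRange j (n+1) j).Nodup := by
      rw [PySem.List.pyRange_of_pos j (n+1) (by omega)]
      refine List.Nodup.map ?_ List.nodup_range
      intro a b hab
      simp only at hab
      have : j * (a : Int) = j * b := by omega
      have := mul_left_cancel₀ (by omega : (j:Int) ≠ 0) this
      exact_mod_cast this
    have hmem : ∀ k ∈ PySem.List.pyRange j (n+1) j, 0 ≤ k ∧ k < n + 1 := by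
      intro k hk
      rw [PySem.List.mem_pyRange_iff_of_pos (by omega)] at hk
      omega
    rw [pv_foldl_setIf _ _ _ _ hnd hmem]
    exact pv_spf_step n j h2 hj hp
  · rw [if_neg (fun hc => hp ((pv_f_zero_iff j h2).mp hc))]
    apply List.map_congr_left
    intro k _
    exact (pv_spf_step_np n j h2 hp k).symm

theorem pv_spf_inv (n : Int) (t : Nat) (h : 2 + (t : Int) ≤ n + 1) :
    (PySem.List.pyRange 2 (2 + (t : Int)) 1).foldl (pvSpfOuter (n+1))
        ((PySem.List.pyRange 0 (n+1) 1).map (fun _ => (0 : Int)))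
      = (PySem.List.pyRange 0 (n+1) 1).map (pvF (2 + (t : Int))) := by
  induction t with
  | zero =>
    simp only [Nat.cast_zero, add_zero]
    rw [PySem.List.pyRange_one_eq_nil le_rfl, List.foldl_nil]
    apply List.map_congr_left
    intro k hk
    rw [PySem.List.mem_pyRange_one] at hk
    rw [pvF, if_neg]
    rintro ⟨hk2, hlt⟩
    have : 2 ≤ pvMF k := by
      rw [pvMF]
      have := (Nat.minFac_prime (by omega : k.toNat ≠ 1)).two_le
      omega
    omega
  | succ t ih =>
    have hc : (2 : Int) + ((t + 1 : Nat) : Int) = (2 + (t : Int)) + 1 := by push_cast; ring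
    rw [hc, PySem.List.pyRange_one_succ_right (a := 2) (b := 2 + (t:Int)) (by omega),
      List.foldl_append, List.foldl_cons, List.foldl_nil, ih (by omega),
      pv_spf_istep n (2 + (t : Int)) (by omega) (by omega)]

-- distinct prime factors of c, ascending
def pvG (c : Int) : List Int :=
  (PySem.List.pyRange 2 (c+1) 1).filter (fun p => decide (p ∣ c ∧ p.natAbs.Prime))

theorem pv_g_step (c : Int) (h2 : 2 ≤ c) :
    pvG c = pvMF c :: pvG (pvStrip c (pvMF c)) := by
  obtain ⟨hdvd, hmf2, hmfle, hmfp, hmin⟩ := pv_mf_facts c h2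
  set p := pvMF c with hp
  set c' := pvStrip c p with hc'
  have hc'1 : 1 ≤ c' := pvStrip_pos c p (by omega) hmf2
  obtain ⟨k, hk, hnd⟩ := pvStrip_spec c p (by omega) hmf2
  have hc'dvd : c' ∣ c := ⟨p ^ k, hk⟩
  have hc'le : c' ≤ c := Int.le_of_dvd (by omega) hc'dvd
  -- a prime divides c iff it is p or divides c'
  have hiff : ∀ q : Int, 2 ≤ q → q.natAbs.Prime → (q ∣ c ↔ (q = p ∨ q ∣ c')) := by
    intro q hq2 hqp
    constructor
    · intro hqc
      rw [hk] at hqc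
      have hqprime : Prime q := Int.prime_iff_natAbs_prime.mpr hqp
      rcases hqprime.dvd_mul.mp hqc with h' | h'
      · exact Or.inr h'
      · left
        have hqd : q ∣ p := hqprime.dvd_of_dvd_pow h'
        have h1 : q.natAbs ∣ p.natAbs := Int.natAbs_dvd_natAbs.mpr hqd
        rcases Nat.Prime.eq_one_or_self_of_dvd hmfp _ h1 with h'' | h''
        · exfalso; have := hqp.two_le; omega
        · omega
    · rintro (rfl | hqc')
      · exact hdvd
      · exact dvd_trans hqc' hc'dvd
  -- primes dividing c' are > p
  have hgt : ∀ q : Int, 2 ≤ q → q.natAbs.Prime → q ∣ c' → p < q := by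
    intro q hq2 hqp hqc'
    have hqc : q ∣ c := dvd_trans hqc' hc'dvd
    have hge := hmin q hq2 hqp hqc
    rcases lt_or_eq_of_le hge with h' | h'
    · exact h'
    · exfalso; subst h'; exact hnd hqc'
  -- split [2, c+1) at p and p+1
  rw [pvG, PySem.List.pyRange_one_append 2 p (c+1) (by omega) (by omega), List.filter_append,
    PySem.List.pyRange_one_append p (p+1) (c+1) (by omega) (by omega), List.filter_append]
  have h1 : List.filter (fun q => decide (q ∣ c ∧ q.natAbs.Prime)) (PySem.List.pyRange 2 p 1)
      = [] := by
    rw [List.filter_eq_nil_iff]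
    intro q hq
    rw [PySem.List.mem_pyRange_one] at hq
    simp only [decide_eq_true_eq]
    rintro ⟨hqc, hqp⟩
    have := hmin q hq.1 hqp hqc
    omega
  have h2' : List.filter (fun q => decide (q ∣ c ∧ q.natAbs.Prime))
      (PySem.List.pyRange p (p+1) 1) = [p] := by
    rw [PySem.List.pyRange_one_singleton]
    simp only [List.filter_cons, List.filter_nil, decide_eq_true_eq]
    rw [if_pos ⟨hdvd, hmfp⟩]
  have h3 : List.filter (fun q => decide (q ∣ c ∧ q.natAbs.Prime))
        (PySem.List.pyRange (p+1) (c+1) 1)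
      = List.filter (fun q => decide (q ∣ c' ∧ q.natAbs.Prime))
        (PySem.List.pyRange (p+1) (c+1) 1) := by
    apply List.filter_congr
    intro q hq
    rw [PySem.List.mem_pyRange_one] at hq
    rw [Bool.eq_iff_iff]
    simp only [decide_eq_true_eq]
    constructor
    · rintro ⟨hqc, hqp⟩
      refine ⟨?_, hqp⟩
      rcases (hiff q (by omega) hqp).mp hqc with h' | h'
      · omega
      · exact h'
    · rintro ⟨hqc', hqp⟩
      exact ⟨(hiff q (by omega) hqp).mpr (Or.inr hqc'), hqp⟩
  have h4 : List.filter (fun q => decide (q ∣ c' ∧ q.natAbs.Prime))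
        (PySem.List.pyRange (p+1) (c+1) 1) = pvG c' := by
    have hsplitA : List.filter (fun q => decide (q ∣ c' ∧ q.natAbs.Prime))
          (PySem.List.pyRange 2 (c+1) 1)
        = List.filter (fun q => decide (q ∣ c' ∧ q.natAbs.Prime))
            (PySem.List.pyRange 2 (p+1) 1)
          ++ List.filter (fun q => decide (q ∣ c' ∧ q.natAbs.Prime))
            (PySem.List.pyRange (p+1) (c+1) 1) := by
      rw [← List.filter_append, ← PySem.List.pyRange_one_append 2 (p+1) (c+1) (by omega) (by omega)]
    have hsplitB : List.filter (fun q => decide (q ∣ c' ∧ q.natAbs.Prime))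
          (PySem.List.pyRange 2 (c+1) 1)
        = pvG c'
          ++ List.filter (fun q => decide (q ∣ c' ∧ q.natAbs.Prime))
            (PySem.List.pyRange (c'+1) (c+1) 1) := by
      rw [pvG, ← List.filter_append,
        ← PySem.List.pyRange_one_append 2 (c'+1) (c+1) (by omega) (by omega)]
    have hlow : List.filter (fun q => decide (q ∣ c' ∧ q.natAbs.Prime))
        (PySem.List.pyRange 2 (p+1) 1) = [] := by
      rw [List.filter_eq_nil_iff]
      intro q hq
      rw [PySem.List.mem_pyRange_one] at hq
      simp only [decide_eq_true_eq]
      rintro ⟨hqc', hqp⟩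
      have := hgt q hq.1 hqp hqc'
      omega
    have hhigh : List.filter (fun q => decide (q ∣ c' ∧ q.natAbs.Prime))
        (PySem.List.pyRange (c'+1) (c+1) 1) = [] := by
      rw [List.filter_eq_nil_iff]
      intro q hq
      rw [PySem.List.mem_pyRange_one] at hq
      simp only [decide_eq_true_eq]
      rintro ⟨hqc', -⟩
      have := Int.le_of_dvd (by omega) hqc'
      omega
    rw [hlow, List.nil_append] at hsplitA
    rw [hhigh, List.append_nil] at hsplitB
    rw [← hsplitA, hsplitB]
  rw [h1, h2', h3, h4]
  rfl

theorem pv_chain_eq (n : Int) (fuel : Nat) :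
    ∀ (c : Int) (row : List Int), 1 ≤ c → c ≤ n → c.toNat ≤ fuel →
    pvChainF fuel c ((PySem.List.pyRange 0 (n+1) 1).map (pvF (n+1))) row = row ++ pvG c := by
  induction fuel with
  | zero => intro c row h1 hc hf; omega
  | succ fuel ih =>
    intro c row h1 hc hf
    rw [pvChainF]
    by_cases h2 : 2 ≤ c
    · rw [if_pos (by omega)]
      rw [pv_getD_map (pvF (n+1)) 0 (n+1) c (by omega) (by omega)]
      obtain ⟨hdvd, hmf2, hmfle, hmfp, hmin⟩ := pv_mf_facts c h2
      have hF : pvF (n+1) c = pvMF c := by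
        rw [pvF, if_pos ⟨h2, by omega⟩]
      rw [hF]
      have hc'1 : 1 ≤ pvStrip c (pvMF c) := pvStrip_pos c (pvMF c) (by omega) hmf2
      obtain ⟨k, hk, hndvd⟩ := pvStrip_spec c (pvMF c) (by omega) hmf2
      have hc'dvd : pvStrip c (pvMF c) ∣ c := ⟨pvMF c ^ k, hk⟩
      have hc'lt : pvStrip c (pvMF c) < c := by
        rcases lt_or_eq_of_le (Int.le_of_dvd (by omega) hc'dvd) with h' | h'
        · exact h'
        · exfalso; apply hndvd; rw [h']; exact hdvd
      rw [ih _ _ hc'1 (by omega) (by omega), pv_g_step c h2]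
      simp
    · have hc1 : c = 1 := by omega
      rw [if_neg (by omega)]
      have : pvG c = [] := by
        rw [pvG, hc1, PySem.List.pyRange_one_eq_nil (by omega)]
        rfl
      rw [this, List.append_nil]

-- pvG agrees with the sieve characterisation
theorem pv_gold_trunc (n m : Int) (hm1 : 1 ≤ m) (hmn : m ≤ n) : pvG m = pvGold (n+1) m := by
  rw [pvGold, PySem.List.pyRange_one_append 2 (m+1) (n+1) (by omega) (by omega),
    List.filter_append]
  have htail : List.filter (fun p => decide (p ∣ m ∧ p ≤ m ∧ p.natAbs.Prime))
      (PySem.List.pyRange (m+1) (n+1) 1) = [] := by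
    rw [List.filter_eq_nil_iff]
    intro p hp
    rw [PySem.List.mem_pyRange_one] at hp
    simp only [decide_eq_true_eq]
    rintro ⟨-, hle, -⟩
    omega
  rw [htail, List.append_nil, pvG]
  apply List.filter_congr
  intro p hp
  rw [PySem.List.mem_pyRange_one] at hp
  rw [Bool.eq_iff_iff]
  simp only [decide_eq_true_eq]
  constructor
  · rintro ⟨h1, h2⟩; exact ⟨h1, by omega, h2⟩
  · rintro ⟨h1, -, h3⟩; exact ⟨h1, h3⟩

-- rows with p ≤ k impossible are empty
theorem pv_gold_small (j k : Int) (hk : k ≤ 1) : pvGold j k = [] := by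
  rw [pvGold, List.filter_eq_nil_iff]
  intro p hp
  rw [PySem.List.mem_pyRange_one] at hp
  simp only [decide_eq_true_eq]
  rintro ⟨-, hle, -⟩
  omega

-- B computes the same rows
theorem pv_alt_eq_state (n : Int) : radsieve_alt n = pvState n (n+1) := by
  rw [radsieve_alt]
  by_cases hn0 : 0 ≤ n
  · simp only [if_pos hn0]
    have htbl : pvSpfTable (n+1) = (PySem.List.pyRange 0 (n+1) 1).map (pvF (n+1)) := by
      by_cases hn1 : 1 ≤ n
      · have h2 := pv_spf_inv n (n-1).toNat (by omega)
        rw [show (2:Int) + ((n-1).toNat:Int) = n + 1 from by omega] at h2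
        rw [pvSpfTable]
        exact h2
      · -- n = 0: the first loop runs zero times and pvF 1 is 0 everywhere
        rw [pvSpfTable, PySem.List.pyRange_one_eq_nil (a := 2) (b := n+1) (by omega),
          List.foldl_nil]
        apply List.map_congr_left
        intro k hk
        rw [PySem.List.mem_pyRange_one] at hk
        rw [pvF, if_neg (by rintro ⟨h2, -⟩; omega)]
    rw [htbl, pvState]
    apply List.map_congr_left
    intro k hk
    rw [PySem.List.mem_pyRange_one] at hk
    by_cases hk1 : 1 ≤ k
    · rw [pvRow, pv_chain_eq n k.toNat k [] hk1 (by omega) le_rfl, List.nil_append]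
      by_cases hk2 : 2 ≤ k
      · exact pv_gold_trunc n k hk1 (by omega)
      · have hk1' : k = 1 := by omega
        subst hk1'
        rw [pv_gold_small _ _ le_rfl, pvG, PySem.List.pyRange_one_eq_nil (by omega)]
        rfl
    · have hk0 : k = 0 := by omega
      subst hk0
      rw [pv_gold_small _ _ (by omega), pvRow]
      rfl
  · rw [if_neg hn0, PySem.List.pyRange_one_eq_nil (a := 0) (b := 0) le_rfl, pvState,
      PySem.List.pyRange_one_eq_nil (a := 0) (b := n+1) (by omega)]
    rfl

-- ===== VERDICT (by name: the statement is the Claim_ definition above) =====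
theorem radsieve_spec : Claim_equal_radsieve := by
  intro n _
  unfold Spec_radsieve
  rw [pv_alt_eq_state]
  by_cases hn : 2 ≤ n
  · have h2 := pv_sieve_inv n (n-1).toNat (by omega)
    rw [show (2:Int) + ((n-1).toNat:Int) = n + 1 from by omega] at h2
    rw [radsieve]
    exact h2
  · -- n ≤ 1: the outer loop runs zero times and every row of both sides is []
    rw [radsieve, PySem.List.pyRange_one_eq_nil (a := 2) (b := n+1) (by omega)]
    simp only [List.foldl_nil, pvState]
    refine List.map_congr_left ?_
    intro k hk
    rw [PySem.List.mem_pyRange_one] at hk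
    rw [pvGold, PySem.List.pyRange_one_eq_nil (by omega)]
    rfl
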